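-- pv_equiv track=rewrite | github.com/MinwooJe/Algorithm | 프로그래머스/0/120921. 문자열 밀기/문자열 밀기.py | solution
-- ===== SOURCE A (Python) =====
-- def solution(A, B):
--     answer = 0
--     l = len(A)
--     new = ''
--     check = [A]
--
--     for i in range(l-1):
--         new = A[l-i-1:] + A[:l-i-1]
--         check.append(new)
--
--     if B in check:
--         answer = check.index(B)
--     else:
--         answer = -1
--     return answer
-- ===== SOURCE B (Python) =====
-- def solution(A, B):
--     if len(A) != len(B):
--         return -1
--     return (B + B).find(A)
-- ===== Notes on version B (the rewrite author's own statement) =====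
-- stated objective: faster
-- what changed: Instead of materialising all n right-rotations of A into a list and then list-searching B with 'in'/'index', B notes that right-rotating A by j gives B iff A occurs at offset j in B+B, so it answers with a single substring search (B+B).find(A) after an O(1) length check.
import Mathlib
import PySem

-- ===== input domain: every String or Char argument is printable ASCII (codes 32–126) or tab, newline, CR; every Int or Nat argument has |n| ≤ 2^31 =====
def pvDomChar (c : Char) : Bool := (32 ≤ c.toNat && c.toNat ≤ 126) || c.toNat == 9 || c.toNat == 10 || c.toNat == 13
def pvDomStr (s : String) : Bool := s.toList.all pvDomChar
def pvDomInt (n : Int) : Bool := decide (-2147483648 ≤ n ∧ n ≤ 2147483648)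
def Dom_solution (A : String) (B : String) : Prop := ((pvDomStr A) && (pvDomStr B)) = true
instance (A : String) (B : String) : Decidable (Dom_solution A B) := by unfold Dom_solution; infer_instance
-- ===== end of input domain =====

-- B replaces A's "build every right-rotation, then list-search" with one substring search
-- of A in B+B (the match position IS the shift count); proved to return the same value.

-- ===== PORT A =====
-- A's code on the character lists: check = [A]; for i in range(l-1): check.append(A[l-i-1:] + A[:l-i-1]);
-- then check.index(B) if B in check else -1.
def solutionChars (a : List Char) (b : List Char) : Int :=
  let l : Int := PySem.Chars.len a
  let check : List (List Char) :=
    (PySem.List.pyRange 0 (l - 1) 1).foldl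
      (fun check i =>
        check ++ [PySem.List.slice a (some (l - i - 1)) none ++ PySem.List.slice a none (some (l - i - 1))])
      [a]
  if b ∈ check then ((PySem.List.index? check b).getD 0 : Int) else -1

def solution (A : String) (B : String) : Int := solutionChars A.toList B.toList

-- ===== PORT B =====
-- Source B: return (B + B).find(A) if len(A) == len(B) else -1
def solutionAltChars (a : List Char) (b : List Char) : Int :=
  if PySem.Chars.len a ≠ PySem.Chars.len b then -1
  else PySem.Chars.find (b ++ b) a

def solution_alt (A : String) (B : String) : Int := solutionAltChars A.toList B.toList

-- ===== PRECONDITION & SPEC =====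
def Spec_solution (A : String) (B : String) (out : Int) : Prop := out = solution_alt A B
instance (A : String) (B : String) (out : Int) : Decidable (Spec_solution A B out) := by unfold Spec_solution; infer_instance

-- ===== CLAIM (what is proved, stated in full; the proofs are below) =====
def Claim_equal_solution : Prop := ∀ (A : String) (B : String), Dom_solution A B → Spec_solution A B (solution A B)

-- ===== LEMMAS AND PROOFS =====

-- the j-th entry of A's `check` list: the right-rotation of a by j
def rotR (a : List Char) (j : Nat) : List Char :=
  a.drop (a.length - j) ++ a.take (a.length - j)

lemma rotR_zero (a : List Char) : rotR a 0 = a := by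
  simp [rotR]

lemma rotR_length (a : List Char) (j : Nat) : (rotR a j).length = a.length := by
  simp [rotR]

-- A's check list, fold unrolled: a followed by the right-rotations by 1 .. n-1
lemma check_eq (a : List Char) :
    (PySem.List.pyRange 0 (PySem.Chars.len a - 1) 1).foldl
      (fun check i =>
        check ++ [PySem.List.slice a (some (PySem.Chars.len a - i - 1)) none ++
                  PySem.List.slice a none (some (PySem.Chars.len a - i - 1))])
      [a]
    = a :: (List.range (a.length - 1)).map (fun k => rotR a (k + 1)) := by
  rw [PySem.List.pyRange_one, List.foldl_map, PySem.List.foldl_append_singleton_eq_map]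
  have hn : ((PySem.Chars.len a) - 1 - 0).toNat = a.length - 1 := by
    rw [PySem.Chars.len_eq]; omega
  rw [hn, List.singleton_append]
  congr 1
  apply List.map_congr_left
  intro k hk
  rw [List.mem_range] at hk
  have hcast : PySem.Chars.len a - (0 + (k : Int)) - 1 = ((a.length - 1 - k : Nat) : Int) := by
    rw [PySem.Chars.len_eq]; omega
  rw [hcast, PySem.List.slice_from _ (Int.natCast_nonneg _),
      PySem.List.slice_to _ (Int.natCast_nonneg _)]
  simp only [Int.toNat_natCast, rotR]
  have h2 : a.length - (k + 1) = a.length - 1 - k := by omega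
  rw [h2]

lemma check_eq_map_range (a : List Char) (h : 1 ≤ a.length) :
    a :: (List.range (a.length - 1)).map (fun k => rotR a (k + 1))
      = (List.range a.length).map (rotR a) := by
  obtain ⟨m, hm⟩ : ∃ m, a.length = m + 1 := ⟨a.length - 1, by omega⟩
  rw [hm, List.range_succ_eq_map]
  simp [List.map_map, Function.comp, rotR_zero]

lemma rotR_eq_iff (a b : List Char) (j : Nat) (hb : b.length = a.length) (hj : j ≤ a.length) :
    rotR a j = b ↔ b.drop j ++ b.take j = a := by
  constructor
  · intro h
    have hX : (a.drop (a.length - j)).length = j := by simp; omega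
    rw [← h, rotR, List.drop_left' hX, List.take_left' hX, List.take_append_drop]
  · intro h
    have hl : (b.drop j ++ b.take j).length - j = (b.drop j).length := by simp; omega
    rw [rotR]
    conv_lhs => rw [← h]
    rw [hl, List.drop_left, List.take_left, List.take_append_drop]

lemma prefix_drop_iff (a b : List Char) (j : Nat) (hb : b.length = a.length) (hj : j ≤ a.length) :
    a <+: (b ++ b).drop j ↔ b.drop j ++ b.take j = a := by
  have hdrop : (b ++ b).drop j = b.drop j ++ b := by
    rw [List.drop_append]
    have h0 : j - b.length = 0 := by omega
    rw [h0, List.drop_zero]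
  have htake : (b.drop j ++ b).take a.length = b.drop j ++ b.take j := by
    rw [List.take_append]
    have h1 : (b.drop j).take a.length = b.drop j := by
      apply List.take_of_length_le; simp; omega
    have h2 : a.length - (b.drop j).length = j := by simp; omega
    rw [h1, h2]
  rw [hdrop, List.prefix_iff_eq_take, htake]
  exact eq_comm

-- the two characterisations combined: check[j] = b iff a occurs in b++b at position j
lemma key_iff (a b : List Char) (j : Nat) (hb : b.length = a.length) (hj : j ≤ a.length) :
    rotR a j = b ↔ a <+: (b ++ b).drop j := by
  rw [rotR_eq_iff a b j hb hj, prefix_drop_iff a b j hb hj]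

lemma index?_eq_some_of {α : Type} [BEq α] [LawfulBEq α] (xs : List α) (v : α) (k : Nat)
    (hk : k < xs.length) (hv : xs[k] = v) (hmin : ∀ j (hj : j < k), xs[j]'(by omega) ≠ v) :
    PySem.List.index? xs v = some k := by
  induction xs generalizing k with
  | nil => simp at hk
  | cons x t ih =>
    cases k with
    | zero =>
      simp only [List.getElem_cons_zero] at hv
      rw [← hv]
      exact PySem.List.index?_cons_self x t
    | succ k =>
      have hx : x ≠ v := by simpa using hmin 0 (by omega)
      rw [PySem.List.index?_cons_of_ne _ hx]
      rw [ih k (by simpa using hk) (by simpa using hv)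
        (fun j hj => by simpa using hmin (j + 1) (by omega))]
      rfl

lemma solutionChars_eq_alt (a b : List Char) : solutionChars a b = solutionAltChars a b := by
  simp only [solutionChars, solutionAltChars]
  rw [check_eq]
  by_cases hlen : b.length = a.length
  · rw [if_neg (show ¬(PySem.Chars.len a ≠ PySem.Chars.len b) by
      rw [PySem.Chars.len_eq, PySem.Chars.len_eq]; omega)]
    by_cases hn : 1 ≤ a.length
    · rw [check_eq_map_range a hn]
      by_cases hmem : b ∈ (List.range a.length).map (rotR a)
      · rw [if_pos hmem]
        obtain ⟨j0, hj0n, hj0⟩ : ∃ j0, j0 < a.length ∧ rotR a j0 = b := by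
          simpa [List.mem_map, List.mem_range, and_comm] using hmem
        have hpre0 : a <+: (b ++ b).drop j0 :=
          (key_iff a b j0 hlen (by omega)).mp hj0
        have hnonneg : 0 ≤ PySem.Chars.find (b ++ b) a := by
          rw [PySem.Chars.find_nonneg_iff]
          have h := (PySem.Chars.exists_prefix_drop_iff_isIn a (b ++ b)).mp ⟨j0, hpre0⟩
          rwa [PySem.Chars.isIn_iff_infix] at h
        obtain ⟨hp1, hp2⟩ := PySem.Chars.find_spec hnonneg
        set p := (PySem.Chars.find (b ++ b) a).toNat with hpdef
        have hfp : PySem.Chars.find (b ++ b) a = (p : Int) := by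
          rw [hpdef]; exact (Int.toNat_of_nonneg hnonneg).symm
        have hple : p ≤ j0 := by
          by_contra hgt
          exact hp2 j0 (by omega) hpre0
        have hpn : p < a.length := by omega
        have hcheckp : rotR a p = b := (key_iff a b p hlen (by omega)).mpr hp1
        have hidx : PySem.List.index? ((List.range a.length).map (rotR a)) b = some p :=
          index?_eq_some_of _ b p (by simpa using hpn)
            (by simp only [List.getElem_map, List.getElem_range]; exact hcheckp)
            (fun j hj => by
              simp only [List.getElem_map, List.getElem_range]
              exact fun hc => hp2 j hj ((key_iff a b j hlen (by omega)).mp hc))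
        rw [hidx, hfp]
        rfl
      · rw [if_neg hmem]
        have hfind : PySem.Chars.find (b ++ b) a = -1 := by
          by_contra hne
          have hnonneg : 0 ≤ PySem.Chars.find (b ++ b) a := by
            have := PySem.Chars.neg_one_le_find (b ++ b) a
            omega
          obtain ⟨hp1, hp2⟩ := PySem.Chars.find_spec hnonneg
          set p := (PySem.Chars.find (b ++ b) a).toNat with hpdef
          have hplen := hp1.length_le
          simp only [List.length_drop, List.length_append] at hplen
          have hpn : p ≤ a.length := by omega
          rcases lt_or_eq_of_le hpn with hlt | hpeq
          · exact hmem (List.mem_map.mpr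
              ⟨p, List.mem_range.mpr hlt, (key_iff a b p hlen hpn).mpr hp1⟩)
          · have hdropb : (b ++ b).drop p = b := List.drop_left' (by omega)
            rw [hdropb] at hp1
            have hab : a = b := hp1.eq_of_length (by omega)
            exact hmem (List.mem_map.mpr
              ⟨0, List.mem_range.mpr (by omega), by rw [rotR_zero, hab]⟩)
        rw [hfind]
    · have ha : a = [] := List.eq_nil_of_length_eq_zero (by omega)
      have hb0 : b = [] := List.eq_nil_of_length_eq_zero (by omega)
      subst ha; subst hb0
      simp [PySem.Chars.find_nil]
  · rw [if_pos (show PySem.Chars.len a ≠ PySem.Chars.len b by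
      rw [PySem.Chars.len_eq, PySem.Chars.len_eq]; omega)]
    rw [if_neg]
    intro hmem
    rcases List.mem_cons.mp hmem with h | h
    · exact hlen (h ▸ rfl)
    · obtain ⟨k, -, hk⟩ := List.mem_map.mp h
      have hr := rotR_length a (k + 1)
      rw [hk] at hr
      exact hlen hr

-- ===== VERDICT (by name: the statement is the Claim_ definition above) =====
theorem solution_spec : Claim_equal_solution := by
  intro A B _
  unfold Spec_solution solution solution_alt
  exact solutionChars_eq_alt A.toList B.toList
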